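-- pv_equiv track=rewrite | github.com/letkh/Informatika23-24 | 27.11.2023/270 variant/5.py | f
-- ===== SOURCE A (Python) =====
-- def f(n):
--     n_bin = format(n, 'b')
--     tmp = int(n_bin)
--     c = 0
--     s = ''
--     while tmp > 0:
--         c += tmp % 10
--         tmp //= 10
--     if c % 2 == 0:
--         s = '110' + n_bin[3:] + '10'
--     else:
--         s = '10' + n_bin[2:] + '101'
--     return int(s, 2)
-- ===== SOURCE B (Python) =====
-- def f(n):
--     n_bin = format(n, 'b')
--     c = 0
--     m = n
--     while m > 0:
--         m &= m - 1
--         c += 1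
--     if c % 2 == 0:
--         s = '110' + n_bin[3:] + '10'
--     else:
--         s = '10' + n_bin[2:] + '101'
--     return int(s, 2)
-- ===== Notes on version B (the rewrite author's own statement) =====
-- stated objective: simpler
-- what changed: The popcount is computed by a Kernighan bit-clearing loop (m &= m-1) directly on n instead of re-parsing the binary string as a decimal integer and summing its decimal digits with a division loop.
import Mathlib
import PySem

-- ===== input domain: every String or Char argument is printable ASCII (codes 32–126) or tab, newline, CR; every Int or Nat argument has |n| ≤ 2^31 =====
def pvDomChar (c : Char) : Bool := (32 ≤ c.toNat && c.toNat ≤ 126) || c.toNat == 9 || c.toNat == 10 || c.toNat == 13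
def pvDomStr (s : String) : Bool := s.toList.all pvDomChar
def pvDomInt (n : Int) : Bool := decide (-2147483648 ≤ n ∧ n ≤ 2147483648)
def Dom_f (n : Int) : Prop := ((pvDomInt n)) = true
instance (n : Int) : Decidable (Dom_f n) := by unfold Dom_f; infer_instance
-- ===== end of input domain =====

-- B replaces A's decimal-reparse-and-digit-sum popcount by a Kernighan bit-clearing
-- loop directly on n (objective: simpler); the string templates are unchanged.

-- ===== PORT A =====

-- format(m,'b') digits of a Nat, least significant first
def pvBitsRev (m : Nat) : List Char :=
  if h : m = 0 then []
  else (if m % 2 = 1 then '1' else '0') :: pvBitsRev (m / 2)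

-- format(n,'b'): '-' prefix for negative n, '0' for zero, else binary digits msb first
def pvFormatB (n : Int) : List Char :=
  if n < 0 then '-' :: (pvBitsRev (-n).toNat).reverse
  else if n = 0 then ['0']
  else (pvBitsRev n.toNat).reverse

-- decimal value of a run of digit characters (Python int() of the digit part)
def pvDigitsVal (cs : List Char) : Nat :=
  cs.foldl (fun a c => a * 10 + (c.toNat - 48)) 0

-- int(cs): hand port, exact for an optional '-' sign followed by decimal digits,
-- which is exactly the shape of format(n,'b')'s output
def pvDecParse (cs : List Char) : Int :=
  if cs.head? = some '-' then -((pvDigitsVal (cs.drop 1) : Nat) : Int)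
  else ((pvDigitsVal cs : Nat) : Int)

-- while tmp > 0: c += tmp % 10; tmp //= 10   (Lean / and % agree with Python for t > 0)
def pvDigitSum (t : Int) : Int :=
  if h : 0 < t then t % 10 + pvDigitSum (t / 10) else 0
termination_by t.toNat
decreasing_by omega

-- int(s, 2): s here is a run of binary digit characters
def pvBinParse (cs : List Char) : Int :=
  ((cs.foldl (fun a c => a * 2 + (c.toNat - 48)) 0 : Nat) : Int)

def f (n : Int) : Int :=
  let n_bin := pvFormatB n
  let tmp := pvDecParse n_bin
  let c := pvDigitSum tmp
  -- n_bin[3:] / n_bin[2:] = drop (exact: nonnegative slice index)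
  let s := if c % 2 = 0 then ['1','1','0'] ++ n_bin.drop 3 ++ ['1','0']
           else ['1','0'] ++ n_bin.drop 2 ++ ['1','0','1']
  pvBinParse s

-- ===== PORT B =====

-- Kernighan loop termination: clearing the lowest set bit decreases a positive int
theorem pv_land_lt (m : Int) (hm : 0 < m) : (Int.land m (m - 1)).toNat < m.toNat := by
  obtain ⟨k, rfl⟩ := Int.eq_ofNat_of_zero_le hm.le
  have hk : 0 < k := by exact_mod_cast hm
  have h1 : ((k : Int)) - 1 = ((k - 1 : Nat) : Int) := by omega
  rw [h1]
  have h2 : Int.land ((k : Nat) : Int) ((k - 1 : Nat) : Int) = ((k &&& (k - 1) : Nat) : Int) := by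
    simp [Int.land]
  rw [h2]
  have h3 : k &&& (k - 1) ≤ k - 1 := Nat.and_le_right
  simp only [Int.toNat_natCast]
  omega

-- while m > 0: m &= m - 1; c += 1
def pvPopLoop (m : Int) (c : Int) : Int :=
  if h : 0 < m then pvPopLoop (Int.land m (m - 1)) (c + 1) else c
termination_by m.toNat
decreasing_by exact pv_land_lt m h

def f_alt (n : Int) : Int :=
  let nb := pvFormatB n
  let c := pvPopLoop n 0
  if c % 2 = 0 then pvBinParse (['1','1','0'] ++ nb.drop 3 ++ ['1','0'])
  else pvBinParse (['1','0'] ++ nb.drop 2 ++ ['1','0','1'])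

-- ===== PRECONDITION & SPEC =====
def Spec_f (n : Int) (out : Int) : Prop := out = f_alt n
instance (n : Int) (out : Int) : Decidable (Spec_f n out) := by unfold Spec_f; infer_instance

-- ===== CLAIM (what is proved, stated in full; the proofs are below) =====
def Claim_equal_f : Prop := ∀ (n : Int), Dom_f n → Spec_f n (f n)

-- ===== LEMMAS AND PROOFS =====

-- number of 1-bits
def pvOnes (m : Nat) : Nat :=
  if h : m = 0 then 0 else pvOnes (m / 2) + m % 2

-- the decimal number whose decimal digits are m's binary digits
def pvDecVal (m : Nat) : Nat :=
  if h : m = 0 then 0 else 10 * pvDecVal (m / 2) + m % 2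

theorem pvOnes_double (q : Nat) : pvOnes (2 * q) = pvOnes q := by
  rcases Nat.eq_zero_or_pos q with hq | hq
  · subst hq; rfl
  · rw [pvOnes]
    have h0 : ¬ (2 * q = 0) := by omega
    have h1 : 2 * q / 2 = q := by omega
    have h2 : 2 * q % 2 = 0 := by omega
    simp [h0, h1, h2]

theorem pvOnes_odd (q : Nat) : pvOnes (2 * q + 1) = pvOnes q + 1 := by
  rw [pvOnes]
  have h1 : (2 * q + 1) / 2 = q := by omega
  have h2 : (2 * q + 1) % 2 = 1 := by omega
  simp [h1, h2]

theorem pv_land_odd (q : Nat) : (2 * q + 1) &&& (2 * q) = 2 * q := by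
  apply Nat.eq_of_testBit_eq
  intro i
  rw [Nat.testBit_land]
  cases i with
  | zero =>
      have h1 : (2 * q + 1) % 2 = 1 := by omega
      have h2 : (2 * q) % 2 = 0 := by omega
      simp [Nat.testBit_zero, h1, h2]
  | succ i =>
      simp only [Nat.testBit_succ]
      have h1 : (2 * q + 1) / 2 = q := by omega
      have h2 : (2 * q) / 2 = q := by omega
      rw [h1, h2]
      simp

theorem pv_land_even (q : Nat) (hq : 0 < q) :
    (2 * q) &&& (2 * q - 1) = 2 * (q &&& (q - 1)) := by
  apply Nat.eq_of_testBit_eq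
  intro i
  rw [Nat.testBit_land]
  cases i with
  | zero =>
      have h1 : (2 * q) % 2 = 0 := by omega
      have h2 : (2 * (q &&& (q - 1))) % 2 = 0 := by omega
      simp [Nat.testBit_zero, h1, h2]
  | succ i =>
      simp only [Nat.testBit_succ]
      have h1 : (2 * q) / 2 = q := by omega
      have h2 : (2 * q - 1) / 2 = q - 1 := by omega
      have h3 : (2 * (q &&& (q - 1))) / 2 = q &&& (q - 1) := by omega
      rw [h1, h2, h3, Nat.testBit_land]

theorem pvOnes_land (k : Nat) (hk : 0 < k) : pvOnes (k &&& (k - 1)) + 1 = pvOnes k := by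
  induction k using Nat.strong_induction_on with
  | _ k IH =>
    rcases Nat.even_or_odd k with ⟨q, hq⟩ | ⟨q, hq⟩
    · -- k = 2q even, q > 0
      have hq2 : k = 2 * q := by omega
      have hqpos : 0 < q := by omega
      rw [hq2]
      rw [pv_land_even q hqpos, pvOnes_double, pvOnes_double]
      exact IH q (by omega) hqpos
    · -- k = 2q + 1 odd
      have hq2 : k = 2 * q + 1 := by omega
      rw [hq2, Nat.add_sub_cancel, pv_land_odd, pvOnes_double, pvOnes_odd]

theorem pvPopLoop_eq (k : Nat) : ∀ c : Int, pvPopLoop (k : Int) c = c + (pvOnes k : Int) := by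
  induction k using Nat.strong_induction_on with
  | _ k IH =>
    intro c
    rcases Nat.eq_zero_or_pos k with hk | hk
    · subst hk
      rw [pvPopLoop, pvOnes]
      simp
    · rw [pvPopLoop]
      have hpos : (0 : Int) < (k : Int) := by exact_mod_cast hk
      have h1 : ((k : Int)) - 1 = ((k - 1 : Nat) : Int) := by omega
      have h2 : Int.land ((k : Nat) : Int) ((k - 1 : Nat) : Int) = ((k &&& (k - 1) : Nat) : Int) := by
        simp [Int.land]
      have hlt : k &&& (k - 1) < k := by
        have := Nat.and_le_right (n := k) (m := k - 1); omega
      rw [dif_pos hpos, h1, h2, IH _ hlt]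
      have := pvOnes_land k hk
      omega

theorem pvBitsRev_chars (m : Nat) : ∀ c ∈ pvBitsRev m, c = '0' ∨ c = '1' := by
  induction m using pvBitsRev.induct with
  | case1 => rw [pvBitsRev]; simp
  | case2 m h IH =>
      rw [pvBitsRev]
      simp only [h, dif_neg, not_false_iff, List.mem_cons]
      intro c hc
      rcases hc with hc | hc
      · subst hc; split <;> simp
      · exact IH c hc

theorem pvDigitsVal_bits (m : Nat) :
    pvDigitsVal ((pvBitsRev m).reverse) = pvDecVal m := by
  have key : ∀ m : Nat,
      (pvBitsRev m).foldr (fun c a => a * 10 + (c.toNat - 48)) 0 = pvDecVal m := by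
    intro m
    induction m using pvBitsRev.induct with
    | case1 => rw [pvBitsRev, pvDecVal]; simp
    | case2 m h IH =>
        rw [pvBitsRev, pvDecVal]
        simp only [h, dif_neg, not_false_iff, List.foldr_cons, IH]
        rcases Nat.mod_two_eq_zero_or_one m with hm | hm <;> simp [hm] <;> omega
  unfold pvDigitsVal
  rw [List.foldl_reverse]
  exact key m

theorem pvDecVal_pos (m : Nat) (hm : m ≠ 0) : 0 < pvDecVal m := by
  induction m using pvDecVal.induct with
  | case1 => exact absurd rfl hm
  | case2 m h IH =>
      rw [pvDecVal]
      rcases Nat.mod_two_eq_zero_or_one m with hp | hp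
      · have : m / 2 ≠ 0 := by omega
        have := IH this
        simp [h]
        omega
      · simp [h]
        omega

theorem pvDigitSum_decVal (m : Nat) : pvDigitSum ((pvDecVal m : Nat) : Int) = (pvOnes m : Int) := by
  induction m using pvDecVal.induct with
  | case1 =>
      have e1 : pvDecVal 0 = 0 := by rw [pvDecVal]; simp
      have e2 : pvOnes 0 = 0 := by rw [pvOnes]; simp
      have e3 : pvDigitSum 0 = 0 := by rw [pvDigitSum]; simp
      rw [e1, e2]
      exact_mod_cast e3
  | case2 m h IH =>
      have hpos : 0 < pvDecVal m := pvDecVal_pos m h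
      rw [pvDigitSum]
      have hposI : (0 : Int) < ((pvDecVal m : Nat) : Int) := by exact_mod_cast hpos
      rw [dif_pos hposI]
      have hval : pvDecVal m = 10 * pvDecVal (m / 2) + m % 2 := by
        rw [pvDecVal]; simp [h]
      have hb : m % 2 < 2 := Nat.mod_lt _ (by omega)
      have hmod : ((pvDecVal m : Nat) : Int) % 10 = ((m % 2 : Nat) : Int) := by
        rw [hval]; push_cast; omega
      have hdiv : ((pvDecVal m : Nat) : Int) / 10 = ((pvDecVal (m / 2) : Nat) : Int) := by
        rw [hval]; push_cast; omega
      rw [hmod, hdiv, IH]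
      have hones : pvOnes m = pvOnes (m / 2) + m % 2 := by rw [pvOnes]; simp [h]
      rw [hones]; push_cast; ring

-- the two popcounts agree for every n
theorem pv_count_eq (n : Int) :
    pvDigitSum (pvDecParse (pvFormatB n)) = pvPopLoop n 0 := by
  rcases lt_trichotomy n 0 with hn | hn | hn
  · -- negative: A's digit loop never runs (tmp < 0), B's loop never runs
    have hA : pvFormatB n = '-' :: (pvBitsRev (-n).toNat).reverse := by
      rw [pvFormatB]; simp [hn]
    rw [hA]
    have hd : pvDecParse ('-' :: (pvBitsRev (-n).toNat).reverse)
        = -((pvDigitsVal ((pvBitsRev (-n).toNat).reverse) : Nat) : Int) := by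
      simp [pvDecParse]
    rw [hd, pvDigitSum, pvPopLoop]
    have h1 : ¬ (0 : Int) < -((pvDigitsVal ((pvBitsRev (-n).toNat).reverse) : Nat) : Int) := by
      have : (0:Int) ≤ ((pvDigitsVal ((pvBitsRev (-n).toNat).reverse) : Nat) : Int) := by positivity
      omega
    rw [dif_neg h1, dif_neg (by omega : ¬ (0:Int) < n)]
  · -- zero
    subst hn
    have hA : pvFormatB 0 = ['0'] := by rw [pvFormatB]; simp
    rw [hA, pvDecParse]
    have : (['0'] : List Char).head? ≠ some '-' := by decide
    rw [if_neg this]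
    have hv : pvDigitsVal ['0'] = 0 := by decide
    rw [hv, pvDigitSum, pvPopLoop]
    simp
  · -- positive
    obtain ⟨k, rfl⟩ := Int.eq_ofNat_of_zero_le hn.le
    have hk : 0 < k := by exact_mod_cast hn
    have hA : pvFormatB (k : Int) = (pvBitsRev k).reverse := by
      rw [pvFormatB]
      have h1 : ¬ ((k : Int) < 0) := by omega
      have h2 : ¬ ((k : Int) = 0) := by exact_mod_cast hk.ne'
      simp [h1, hk.ne', Int.toNat_natCast]
    rw [hA, pvDecParse]
    have hhead : ((pvBitsRev k).reverse).head? ≠ some '-' := by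
      cases hrev : (pvBitsRev k).reverse with
      | nil => simp
      | cons c t =>
          have hc : c ∈ pvBitsRev k := by
            have : c ∈ (pvBitsRev k).reverse := by rw [hrev]; exact List.mem_cons_self
            simpa using this
          have := pvBitsRev_chars k c hc
          simp only [List.head?_cons, ne_eq, Option.some.injEq]
          rcases this with h | h <;> subst h <;> decide
    rw [if_neg hhead, pvDigitsVal_bits, pvDigitSum_decVal, pvPopLoop_eq]
    simp

-- ===== VERDICT (by name: the statement is the Claim_ definition above) =====
theorem f_spec : Claim_equal_f := by
  intro n _
  unfold Spec_f f f_alt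
  simp only [pv_count_eq]
  by_cases h : pvPopLoop n 0 % 2 = 0 <;> simp [h]
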